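-- pv_equiv track=rewrite | github.com/jcolinpatrick/kryptos | scripts/yar/e_yar_nonperiodic.py | autokey_vig_dec_pt
-- ===== SOURCE A (Python) =====
-- AZ = "ABCDEFGHIJKLMNOPQRSTUVWXYZ"
--
-- def _idx(alpha: str):
--     """Build char->index lookup for an alphabet."""
--     return {c: i for i, c in enumerate(alpha)}
--
-- def autokey_vig_dec_pt(ct: str, seed: str, alpha: str = AZ) -> str:
--     """Autokey Vigenere decryption using plaintext extension.
--     Key = seed || PT[0] || PT[1] || ...
--     CT[i] = (PT[i] + K[i]) mod 26, so PT[i] = (CT[i] - K[i]) mod 26.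
--     K[i] = seed[i] for i < len(seed), else PT[i - len(seed)]."""
--     aidx = _idx(alpha)
--     n = len(alpha)
--     slen = len(seed)
--     seed_vals = [aidx[c] for c in seed]
--     pt = []
--     for i, c in enumerate(ct):
--         if i < slen:
--             k = seed_vals[i]
--         else:
--             k = aidx[pt[i - slen]]
--         pt.append(alpha[(aidx[c] - k) % n])
--     return "".join(pt)
-- ===== SOURCE B (Python) =====
-- AZ = "ABCDEFGHIJKLMNOPQRSTUVWXYZ"
--
-- def autokey_vig_dec_pt(ct: str, seed: str, alpha: str = AZ) -> str:
--     """Column-wise autokey decryption: positions r, r+slen, r+2*slen, ... form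
--     independent chains (the key of a position is the plaintext written slen
--     positions earlier), so decrypt each residue class in one sweep carrying
--     the previous plaintext character as the rolling key."""
--     aidx = {c: i for i, c in enumerate(alpha)}
--     n = len(alpha)
--     slen = len(seed)
--     out = [None] * len(ct)
--     for r in range(slen):
--         kc = seed[r]
--         i = r
--         while i < len(ct):
--             kc = alpha[(aidx[ct[i]] - aidx[kc]) % n]
--             out[i] = kc
--             i += slen
--     return "".join(out)
-- ===== Notes on version B (the rewrite author's own statement) =====
-- stated objective: alternative
-- what changed: B decrypts column-wise: each residue class modulo len(seed) is an independent chain, swept once while carrying the previous plaintext character as the rolling key, instead of A's single indexed loop that looks the key back up in the growing plaintext list.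
import Mathlib
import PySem

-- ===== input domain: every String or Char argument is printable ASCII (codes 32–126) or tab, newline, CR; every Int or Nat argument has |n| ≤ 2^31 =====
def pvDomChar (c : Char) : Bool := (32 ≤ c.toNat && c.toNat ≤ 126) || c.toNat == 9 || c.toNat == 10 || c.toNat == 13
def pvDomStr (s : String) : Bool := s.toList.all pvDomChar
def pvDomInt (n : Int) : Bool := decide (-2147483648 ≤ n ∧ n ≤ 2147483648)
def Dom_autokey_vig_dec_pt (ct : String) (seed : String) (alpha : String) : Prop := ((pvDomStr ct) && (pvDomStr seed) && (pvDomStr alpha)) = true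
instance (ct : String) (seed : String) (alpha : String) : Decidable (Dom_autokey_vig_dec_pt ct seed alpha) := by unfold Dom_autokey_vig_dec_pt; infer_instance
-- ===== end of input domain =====

-- B re-implements autokey decryption column-wise (one independent rolling-key sweep
-- per residue class modulo len(seed)) instead of A's single loop that reads the key
-- back out of the growing plaintext list; same cost, different traversal (objective: alternative).

-- ===== PORT A =====
-- shared helper: the dict comprehension {c: i for i, c in enumerate(alpha)} (both Pythons build it)
def pvIdx (alpha : List Char) : PySem.Dict Char Int :=
  (PySem.List.enumerate alpha).foldl (fun d p => d.insert p.2 p.1) PySem.Dict.empty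

-- literal port of A; dict lookups aidx[...] are total getD-forms: Pre_ guarantees the key is present
def autokey_vig_dec_pt (ct : String) (seed : String) (alpha : String) : String :=
  let aidx := pvIdx alpha.toList
  let n : Int := PySem.List.len alpha.toList
  let slen : Int := PySem.List.len seed.toList
  let seed_vals : List Int := seed.toList.map (fun c => aidx.getD c 0)
  let pt : List Char :=
    (PySem.List.enumerate ct.toList).foldl
      (fun pt p =>
        pt ++ [(PySem.List.pyGet? alpha.toList
          (PySem.Int.mod (aidx.getD p.2 0 -
            (if p.1 < slen then PySem.List.pyGetD seed_vals p.1 0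
             else aidx.getD (PySem.List.pyGetD pt (p.1 - slen) ' ') 0)) n)).getD ' '])
      []
  String.ofList pt

-- ===== PORT B =====
-- the inner `while i < len(ct)` loop of Source B; fuel only makes the recursion total
-- (len(ct) steps always suffice: i grows by slen ≥ 1 whenever the loop is entered under Pre_)
def pvWhileB (ct alpha : List Char) (aidx : PySem.Dict Char Int) (n slen : Int) :
    Nat → Int → Char → List Char → List Char
  | 0, _, _, out => out
  | fuel + 1, i, kc, out =>
    if i < PySem.List.len ct then
      let kc' := (PySem.List.pyGet? alpha
        (PySem.Int.mod (aidx.getD (PySem.List.pyGetD ct i ' ') 0 - aidx.getD kc 0) n)).getD ' '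
      pvWhileB ct alpha aidx n slen fuel (i + slen) kc' (PySem.List.pySetD out i kc')
    else out

def autokey_vig_dec_pt_alt (ct : String) (seed : String) (alpha : String) : String :=
  let aidx := pvIdx alpha.toList
  let n : Int := PySem.List.len alpha.toList
  let slen : Int := PySem.List.len seed.toList
  let out0 : List Char := List.replicate ct.toList.length '?'   -- [None] * len(ct); placeholder, every cell is overwritten under Pre_
  let out :=
    (List.range seed.toList.length).foldl
      (fun (out : List Char) (r : Nat) =>
        pvWhileB ct.toList alpha.toList aidx n slen ct.toList.length
          (r : Int) (PySem.List.pyGetD seed.toList (r : Int) ' ') out)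
      out0
  String.ofList out

-- ===== PRECONDITION & SPEC =====
-- Pre_ is exactly the set of inputs on which the Python A returns: every ct and seed character
-- must be a key of aidx (else KeyError), and an empty seed with nonempty ct hits pt[i] on the
-- still-empty pt (IndexError).
def Pre_autokey_vig_dec_pt (ct : String) (seed : String) (alpha : String) : Prop :=
  (ct.toList.all (fun c => alpha.toList.contains c)) = true ∧
    (seed.toList.all (fun c => alpha.toList.contains c)) = true ∧
    (seed.toList = [] → ct.toList = [])

instance (ct : String) (seed : String) (alpha : String) : Decidable (Pre_autokey_vig_dec_pt ct seed alpha) := by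
  unfold Pre_autokey_vig_dec_pt; infer_instance

def pvWitness_autokey_vig_dec_pt : String × String × String :=
  ("ba", "a", "ab")

def Spec_autokey_vig_dec_pt (ct : String) (seed : String) (alpha : String) (out : String) : Prop := out = autokey_vig_dec_pt_alt ct seed alpha
instance (ct : String) (seed : String) (alpha : String) (out : String) : Decidable (Spec_autokey_vig_dec_pt ct seed alpha out) := by unfold Spec_autokey_vig_dec_pt; infer_instance

-- ===== CLAIM (what is proved, stated in full; the proofs are below) =====
def Claim_equal_autokey_vig_dec_pt : Prop := ∀ (ct : String) (seed : String) (alpha : String), Dom_autokey_vig_dec_pt ct seed alpha → Pre_autokey_vig_dec_pt ct seed alpha → Spec_autokey_vig_dec_pt ct seed alpha (autokey_vig_dec_pt ct seed alpha)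

-- ===== LEMMAS AND PROOFS =====

-- the common decryption step: plaintext char from key char kc and ciphertext char c
def pvDec (A : List Char) (kc c : Char) : Char :=
  (PySem.List.pyGet? A
    (PySem.Int.mod ((pvIdx A).getD c 0 - (pvIdx A).getD kc 0) ((A.length : Nat) : Int))).getD ' '

-- the plaintext character both programs produce at position i (key = seed, extended by plaintext)
def pvP (A s L : List Char) (i : Nat) : Char :=
  if _h : 0 < s.length ∧ s.length ≤ i then
    pvDec A (pvP A s L (i - s.length)) (L.getD i ' ')
  else
    pvDec A (s.getD i ' ') (L.getD i ' ')
termination_by i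
decreasing_by omega

-- the key character used at position i
def pvKeyAt (A s L : List Char) (i : Nat) : Char :=
  if i < s.length then s.getD i ' ' else pvP A s L (i - s.length)

lemma pvP_eq (A s L : List Char) (hs : 0 < s.length) (i : Nat) :
    pvP A s L i = pvDec A (pvKeyAt A s L i) (L.getD i ' ') := by
  rw [pvP, pvKeyAt]
  by_cases hi : i < s.length
  · rw [dif_neg (by omega), if_pos hi]
  · rw [dif_pos ⟨hs, by omega⟩, if_neg hi]

lemma pvKeyAt_add (A s L : List Char) (i : Nat) :
    pvKeyAt A s L (i + s.length) = pvP A s L i := by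
  rw [pvKeyAt, if_neg (by omega), Nat.add_sub_cancel]

lemma pv_mod_char {s r j : Nat} (hr : r < s) :
    (r ≤ j ∧ s ∣ (j - r)) ↔ j % s = r := by
  constructor
  · rintro ⟨hj, q, hq⟩
    have : j = s * q + r := by omega
    subst this
    simp [Nat.mod_eq_of_lt hr]
  · intro h
    have hd := Nat.div_add_mod j s
    refine ⟨by omega, j / s, by omega⟩

-- A's loop: processing the rest of ct starting at index j extends map pvP (range j) to the full list
lemma pvFoldA_spec (A s L : List Char) (hs : 0 < s.length) :
    ∀ (t : List Char) (j : Nat), j + t.length = L.length → t = L.drop j →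
    (PySem.List.enumerate t (j : Int)).foldl
      (fun pt p =>
        pt ++ [(PySem.List.pyGet? A
          (PySem.Int.mod ((pvIdx A).getD p.2 0 -
            (if p.1 < ((s.length : Nat) : Int) then
              PySem.List.pyGetD (s.map (fun c => (pvIdx A).getD c 0)) p.1 0
             else (pvIdx A).getD (PySem.List.pyGetD pt (p.1 - ((s.length : Nat) : Int)) ' ') 0))
          ((A.length : Nat) : Int))).getD ' '])
      ((List.range j).map (pvP A s L))
    = (List.range L.length).map (pvP A s L) := by
  intro t
  induction t with
  | nil =>
    intro j hj hdrop
    have hjL : j = L.length := by simpa using hj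
    subst hjL
    simp [PySem.List.enumerate_nil]
  | cons c t ih =>
    intro j hj hdrop
    have hjlen : j < L.length := by simp at hj; omega
    rw [List.drop_eq_getElem_cons hjlen] at hdrop
    injection hdrop with hc ht
    rw [PySem.List.enumerate_cons, List.foldl_cons]
    have step : ((List.range j).map (pvP A s L)) ++
        [(PySem.List.pyGet? A
          (PySem.Int.mod ((pvIdx A).getD c 0 -
            (if ((j : Int)) < ((s.length : Nat) : Int) then
              PySem.List.pyGetD (s.map (fun c => (pvIdx A).getD c 0)) ((j : Int)) 0
             else (pvIdx A).getD
               (PySem.List.pyGetD ((List.range j).map (pvP A s L)) (((j : Int)) - ((s.length : Nat) : Int)) ' ') 0))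
          ((A.length : Nat) : Int))).getD ' ']
        = (List.range (j + 1)).map (pvP A s L) := by
      rw [List.range_succ, List.map_append, List.map_singleton]
      congr 1
      rw [pvP_eq A s L hs j, pvDec]
      subst hc
      rw [List.getD_eq_getElem L ' ' hjlen]
      by_cases hjs : j < s.length
      · rw [if_pos (by exact_mod_cast hjs), PySem.List.pyGetD_natCast,
          List.getD_eq_getElem _ _ (by simpa using hjs), List.getElem_map,
          pvKeyAt, if_pos hjs, List.getD_eq_getElem s ' ' hjs]
      · rw [if_neg (by exact_mod_cast hjs),
          show ((j : Int)) - ((s.length : Nat) : Int) = (((j - s.length : Nat)) : Int) by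
            omega,
          PySem.List.pyGetD_natCast,
          show ((List.range j).map (pvP A s L)).getD (j - s.length) ' ' = pvP A s L (j - s.length) from
            PySem.List.getD_map_range (pvP A s L) j (j - s.length) ' ' (by omega),
          pvKeyAt, if_neg hjs]
    rw [step, show ((j : Int)) + 1 = (((j + 1 : Nat)) : Int) by omega]
    exact ih (j + 1) (by simp at hj ⊢; omega) ht

-- B's while loop: fills exactly the positions ≥ i congruent to i modulo len(seed) with pvP
lemma pvWhileB_spec (A s L : List Char) (hs : 0 < s.length) :
    ∀ (fuel iN : Nat) (out : List Char), L.length ≤ iN + fuel → out.length = L.length →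
    (pvWhileB L A (pvIdx A) ((A.length : Nat) : Int) ((s.length : Nat) : Int)
        fuel (iN : Int) (pvKeyAt A s L iN) out).length = L.length ∧
    ∀ j, j < L.length →
      (pvWhileB L A (pvIdx A) ((A.length : Nat) : Int) ((s.length : Nat) : Int)
        fuel (iN : Int) (pvKeyAt A s L iN) out).getD j ' ' =
      if iN ≤ j ∧ s.length ∣ (j - iN) then pvP A s L j else out.getD j ' ' := by
  intro fuel
  induction fuel with
  | zero =>
    intro iN out hle hlen
    refine ⟨by simp [pvWhileB, hlen], ?_⟩
    intro j hj
    rw [pvWhileB, if_neg (by rintro ⟨h1, -⟩; omega)]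
  | succ fuel ih =>
    intro iN out hle hlen
    by_cases hi : iN < L.length
    · have hguard : ((iN : Int) < PySem.List.len L) := by
        rw [PySem.List.len_eq]; exact_mod_cast hi
      have e1 : (PySem.List.pyGet? A
          (PySem.Int.mod ((pvIdx A).getD (PySem.List.pyGetD L (iN : Int) ' ') 0 -
            (pvIdx A).getD (pvKeyAt A s L iN) 0) ((A.length : Nat) : Int))).getD ' '
          = pvP A s L iN := by
        rw [PySem.List.pyGetD_natCast, pvP_eq A s L hs iN, pvDec]
      have key : pvWhileB L A (pvIdx A) ((A.length : Nat) : Int) ((s.length : Nat) : Int)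
            (fuel + 1) (iN : Int) (pvKeyAt A s L iN) out
          = pvWhileB L A (pvIdx A) ((A.length : Nat) : Int) ((s.length : Nat) : Int)
            fuel (((iN + s.length : Nat)) : Int) (pvKeyAt A s L (iN + s.length))
            (out.set iN (pvP A s L iN)) := by
        simp only [pvWhileB]
        rw [if_pos hguard]
        simp only [e1, PySem.List.pySetD_natCast, pvKeyAt_add]
        norm_cast
      obtain ⟨ihlen, ihget⟩ := ih (iN + s.length) (out.set iN (pvP A s L iN))
        (by omega) (by simpa using hlen)
      refine ⟨by rw [key]; exact ihlen, ?_⟩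
      intro j hj
      rw [key, ihget j hj]
      by_cases hc : iN + s.length ≤ j ∧ s.length ∣ (j - (iN + s.length))
      · obtain ⟨q, hq⟩ := hc.2
        have hmul : s.length * (q + 1) = s.length * q + s.length := by ring
        rw [if_pos hc, if_pos ⟨by omega, ⟨q + 1, by omega⟩⟩]
      · rw [if_neg hc]
        by_cases hij : j = iN
        · subst hij
          rw [if_pos ⟨le_refl _, by simp⟩]
          rw [List.getD_eq_getElem _ _ (by simpa [hlen] using hj), List.getElem_set_self (by simpa [hlen] using hj)]
        · have hset : (out.set iN (pvP A s L iN)).getD j ' ' = out.getD j ' ' := by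
            rw [List.getD_eq_getElem?_getD, List.getD_eq_getElem?_getD,
              List.getElem?_set_ne (by omega)]
          rw [hset, if_neg ?_]
          rintro ⟨hle2, hd⟩
          apply hc
          have hlt : iN < j := by omega
          have hge := Nat.le_of_dvd (by omega) hd
          obtain ⟨q, hq⟩ := hd
          rcases q with - | q'
          · omega
          · have hmul : s.length * (q' + 1) = s.length * q' + s.length := by ring
            exact ⟨by omega, ⟨q', by omega⟩⟩
    · refine ⟨by simp [pvWhileB, hi, hlen], ?_⟩
      intro j hj
      rw [pvWhileB, if_neg (show ¬((iN:Int) < PySem.List.len L) by rw [PySem.List.len_eq]; exact_mod_cast hi)]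
      rw [if_neg (by rintro ⟨h1, -⟩; omega)]

-- B's outer loop over the residue classes 0 … r0-1
lemma pvOuterB_spec (A s L : List Char) (hs : 0 < s.length) :
    ∀ r0, r0 ≤ s.length →
    ((List.range r0).foldl
      (fun (out : List Char) (r : Nat) =>
        pvWhileB L A (pvIdx A) ((A.length : Nat) : Int) ((s.length : Nat) : Int) L.length
          (r : Int) (PySem.List.pyGetD s (r : Int) ' ') out)
      (List.replicate L.length '?')).length = L.length ∧
    ∀ j, j < L.length →
      ((List.range r0).foldl
        (fun (out : List Char) (r : Nat) =>
          pvWhileB L A (pvIdx A) ((A.length : Nat) : Int) ((s.length : Nat) : Int) L.length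
            (r : Int) (PySem.List.pyGetD s (r : Int) ' ') out)
        (List.replicate L.length '?')).getD j ' ' =
      if j % s.length < r0 then pvP A s L j else '?' := by
  intro r0
  induction r0 with
  | zero =>
    intro _
    refine ⟨by simp, ?_⟩
    intro j hj
    rw [List.range_zero, List.foldl_nil, if_neg (by omega)]
    rw [List.getD_eq_getElem _ _ (by simpa using hj), List.getElem_replicate]
  | succ r0 ih =>
    intro hr0
    obtain ⟨plen, pget⟩ := ih (by omega)
    rw [List.range_succ, List.foldl_append, List.foldl_cons, List.foldl_nil]
    have hk : PySem.List.pyGetD s ((r0 : Nat) : Int) ' ' = pvKeyAt A s L r0 := by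
      rw [PySem.List.pyGetD_natCast, pvKeyAt, if_pos (by omega)]
    rw [hk]
    obtain ⟨wlen, wget⟩ := pvWhileB_spec A s L hs L.length r0 _ (by omega) plen
    refine ⟨wlen, ?_⟩
    intro j hj
    rw [wget j hj]
    by_cases hm : j % s.length = r0
    · rw [if_pos ((pv_mod_char (by omega)).mpr hm), if_pos (by omega)]
    · rw [if_neg (fun hcc => hm ((pv_mod_char (by omega)).mp hcc)), pget j hj]
      by_cases h2 : j % s.length < r0
      · rw [if_pos h2, if_pos (by omega)]
      · rw [if_neg h2, if_neg (by omega)]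

-- ===== VERDICT (by name: the statement is the Claim_ definition above) =====
theorem autokey_vig_dec_pt_spec : Claim_equal_autokey_vig_dec_pt := by
  intro ct seed alpha _ hpre
  obtain ⟨-, -, h3⟩ := hpre
  unfold Spec_autokey_vig_dec_pt
  simp only [autokey_vig_dec_pt, autokey_vig_dec_pt_alt, PySem.List.len_eq]
  by_cases hL : ct.toList = []
  · rw [hL]
    simp [PySem.List.enumerate_nil, pvWhileB]
  · have hs : 0 < seed.toList.length := by
      by_cases hse : seed.toList = []
      · exact absurd (h3 hse) hL
      · exact List.length_pos_of_ne_nil hse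
    have hA := pvFoldA_spec alpha.toList seed.toList ct.toList hs ct.toList 0 (by simp) (by simp)
    simp only [List.range_zero, List.map_nil, Nat.cast_zero] at hA
    obtain ⟨blen, bget⟩ :=
      pvOuterB_spec alpha.toList seed.toList ct.toList hs seed.toList.length le_rfl
    congr 1
    rw [hA]
    symm
    apply List.ext_getElem (by rw [blen, List.length_map, List.length_range])
    intro j hj1 hj2
    have hj : j < ct.toList.length := by rw [blen] at hj1; exact hj1
    have hbj := bget j hj
    rw [if_pos (Nat.mod_lt _ hs)] at hbj
    rw [← List.getD_eq_getElem _ ' ' hj1, hbj, List.getElem_map, List.getElem_range]
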